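-- pv_equiv track=rewrite | github.com/Jyoungjo/Algorithm_python | 백준/Silver/11561. 징검다리/징검다리.py | cross_the_bridge
-- ===== SOURCE A (Python) =====
-- def cross_the_bridge(N):
--     res, left, right = 0, 1, N
--     while left <= right:
--         mid = (left + right) // 2
--         sum_mid = mid * (mid + 1) // 2
--
--         if sum_mid <= N:
--             left = mid + 1
--             res = mid
--         else:
--             right = mid - 1
--     return res
-- ===== SOURCE B (Python) =====
-- import math
--
-- def cross_the_bridge(N):
--     s = math.isqrt(8 * N + 1)
--     return (s - 1) // 2
-- ===== Notes on version B (the rewrite author's own statement) =====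
-- stated objective: simpler
-- what changed: Replaced the binary-search loop by the closed form (isqrt(8N+1)-1)//2, the largest k with k(k+1)/2 <= N. Pre_ excludes negative N, on which A returns 0 while B's math.isqrt raises ValueError.
-- outside the precondition, e.g. on cross_the_bridge(-1): A returns 0, B raises ValueError
import Mathlib
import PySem

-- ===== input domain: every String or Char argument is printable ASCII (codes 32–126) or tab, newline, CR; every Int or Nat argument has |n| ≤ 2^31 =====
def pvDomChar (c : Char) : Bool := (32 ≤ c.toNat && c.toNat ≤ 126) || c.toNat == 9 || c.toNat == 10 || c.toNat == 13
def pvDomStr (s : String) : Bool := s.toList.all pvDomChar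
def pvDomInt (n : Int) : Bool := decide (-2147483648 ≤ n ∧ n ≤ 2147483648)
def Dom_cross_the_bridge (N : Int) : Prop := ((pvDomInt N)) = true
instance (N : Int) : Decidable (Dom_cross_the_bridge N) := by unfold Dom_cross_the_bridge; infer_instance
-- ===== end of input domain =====

-- B replaces A's binary search by the closed form (isqrt(8N+1)-1)//2; equivalence is proved for N ≥ 0.

-- ===== PORT A =====
-- the while-loop of A, state (res, left, right); terminates because right - left shrinks
def crossLoop (N res left right : Int) : Int :=
  if _h : left ≤ right then
    let mid := PySem.Int.floordiv (left + right) 2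
    let sum_mid := PySem.Int.floordiv (mid * (mid + 1)) 2
    if sum_mid ≤ N then
      crossLoop N mid (mid + 1) right
    else
      crossLoop N res left (mid - 1)
  else res
termination_by (right + 1 - left).toNat
decreasing_by
  · have := (PySem.Int.floordiv_two_mid_bounds _h).1
    have := (PySem.Int.floordiv_two_mid_bounds _h).2
    omega
  · have := (PySem.Int.floordiv_two_mid_bounds _h).1
    have := (PySem.Int.floordiv_two_mid_bounds _h).2
    omega

def cross_the_bridge (N : Int) : Int := crossLoop N 0 1 N

-- ===== PORT B =====
-- math.isqrt on a nonnegative int is Nat.sqrt (exact integer square root)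
def cross_the_bridge_alt (N : Int) : Int :=
  let s : Int := ((8 * N + 1).toNat.sqrt : Int)
  PySem.Int.floordiv (s - 1) 2

-- ===== PRECONDITION & SPEC =====
-- Pre_ excludes negative N: there A returns 0 while B's math.isqrt raises ValueError.
def Pre_cross_the_bridge (N : Int) : Prop := 0 ≤ N
instance (N : Int) : Decidable (Pre_cross_the_bridge N) := by unfold Pre_cross_the_bridge; infer_instance
def pvWitness_cross_the_bridge : Int := 10

def Spec_cross_the_bridge (N : Int) (out : Int) : Prop := out = cross_the_bridge_alt N
instance (N : Int) (out : Int) : Decidable (Spec_cross_the_bridge N out) := by unfold Spec_cross_the_bridge; infer_instance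

-- ===== CLAIM (what is proved, stated in full; the proofs are below) =====
def Claim_equal_cross_the_bridge : Prop := ∀ (N : Int), Dom_cross_the_bridge N → Pre_cross_the_bridge N → Spec_cross_the_bridge N (cross_the_bridge N)

-- ===== LEMMAS AND PROOFS =====

-- r is "good" for N iff it is the (unique) largest k with k(k+1)/2 ≤ N
def Good (N r : Int) : Prop := r * (r + 1) ≤ 2 * N ∧ 2 * N < (r + 1) * (r + 2)

theorem Good_unique {N r₁ r₂ : Int} (h₁ : Good N r₁) (h₂ : Good N r₂) : r₁ = r₂ := by
  obtain ⟨a₁, b₁⟩ := h₁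
  obtain ⟨a₂, b₂⟩ := h₂
  by_contra hne
  rcases lt_or_gt_of_ne hne with h | h
  · nlinarith
  · nlinarith

theorem floordiv_two_le_iff (m N : Int) : PySem.Int.floordiv m 2 ≤ N ↔ m ≤ 2 * N + 1 := by
  rw [PySem.Int.floordiv_eq_ediv_of_pos (by omega)]
  omega

-- loop invariant: res = left - 1, triangle(res) ≤ N, left ≤ right + 1, N < triangle(right+1)
theorem crossLoop_good (N : Int) (_hN : 0 ≤ N) :
    ∀ res left right : Int, res = left - 1 → res * (res + 1) ≤ 2 * N →
      left ≤ right + 1 → 2 * N < (right + 1) * (right + 2) →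
      Good N (crossLoop N res left right) := by
  intro res left right
  induction res, left, right using crossLoop.induct N with
  | case1 res left right h mid sum_mid hle ih =>
    intro h1 h2 h3 h4
    have hm := PySem.Int.floordiv_two_mid_bounds h
    rw [crossLoop]
    simp only [h, dite_true]
    rw [if_pos (by exact hle)]
    obtain ⟨r, hr⟩ := Int.even_mul_succ_self mid
    have hsum : mid * (mid + 1) ≤ 2 * N := by
      have := (floordiv_two_le_iff (mid * (mid + 1)) N).mp hle
      omega
    exact ih (by omega) hsum (by omega) h4
  | case2 res left right h mid sum_mid hgt ih =>
    intro h1 h2 h3 h4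
    have hm := PySem.Int.floordiv_two_mid_bounds h
    rw [crossLoop]
    simp only [h, dite_true]
    rw [if_neg (by exact hgt)]
    have hsum : 2 * N + 1 < mid * (mid + 1) := by
      have := (floordiv_two_le_iff (mid * (mid + 1)) N)
      omega
    refine ih h1 h2 (by omega) ?_
    have : (mid - 1 + 1) * (mid - 1 + 2) = mid * (mid + 1) := by ring
    omega
  | case3 res left right h =>
    intro h1 h2 h3 h4
    rw [crossLoop]
    simp only [h, dite_false]
    constructor
    · exact h2
    · have : left = right + 1 := by omega
      have hr : res = right := by omega
      subst hr
      omega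

theorem cross_the_bridge_good (N : Int) (hN : 0 ≤ N) : Good N (cross_the_bridge N) := by
  unfold cross_the_bridge
  apply crossLoop_good N hN 0 1 N
  · ring
  · nlinarith
  · omega
  · nlinarith

theorem alt_good (N : Int) (hN : 0 ≤ N) : Good N (cross_the_bridge_alt N) := by
  unfold cross_the_bridge_alt
  set m : Nat := (8 * N + 1).toNat with hm
  have hmN : (m : Int) = 8 * N + 1 := by omega
  have hlo : (m.sqrt : Int) * (m.sqrt : Int) ≤ 8 * N + 1 := by
    have h := Nat.sqrt_le m
    have h' : ((m.sqrt * m.sqrt : Nat) : Int) ≤ (m : Int) := by exact_mod_cast h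
    push_cast at h'
    omega
  have hhi : 8 * N + 1 < ((m.sqrt : Int) + 1) * ((m.sqrt : Int) + 1) := by
    have h := Nat.lt_succ_sqrt m
    have h' : (m : Int) < (((m.sqrt + 1) * (m.sqrt + 1) : Nat) : Int) := by exact_mod_cast h
    push_cast at h'
    omega
  set s : Int := (m.sqrt : Int) with hs
  have hs1 : 1 ≤ s := by
    have : 0 < m.sqrt := Nat.sqrt_pos.mpr (by omega)
    omega
  set k : Int := PySem.Int.floordiv (s - 1) 2 with hk
  have hkb : k * 2 ≤ s - 1 ∧ s - 1 < (k + 1) * 2 := by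
    rw [hk, PySem.Int.floordiv_eq_ediv_of_pos (by omega)]
    omega
  constructor
  · -- (2k+1)^2 ≤ s^2 ≤ 8N+1 gives k(k+1) ≤ 2N
    have hsq : (2 * k + 1) * (2 * k + 1) ≤ s * s :=
      mul_self_le_mul_self (by omega) (by omega)
    nlinarith
  · -- 8N+1 < (s+1)^2 ≤ (2k+3)^2 gives 2N < (k+1)(k+2)
    have hsq : (s + 1) * (s + 1) ≤ (2 * k + 3) * (2 * k + 3) :=
      mul_self_le_mul_self (by omega) (by omega)
    nlinarith

-- ===== VERDICT (by name: the statement is the Claim_ definition above) =====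
theorem cross_the_bridge_spec : Claim_equal_cross_the_bridge := by
  intro N _ hPre
  unfold Spec_cross_the_bridge
  exact Good_unique (cross_the_bridge_good N hPre) (alt_good N hPre)
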